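-- pv_equiv track=rewrite | github.com/develdeco/code-challenges | remove_digit_compare_strings.py | solution
-- ===== SOURCE A (Python) =====
-- def solution(s, t):
--     res = 0
--     for i in range(len(max([s,t],key=len))):
--         if i < len(s) and s[i].isdigit() and s[:i]+s[i+1:] < t:
--             res += 1
--         if i < len(t) and t[i].isdigit() and s < t[:i]+t[i+1:]:
--             res += 1
--     return res
-- ===== SOURCE B (Python) =====
-- def solution(s, t):
--     # Merge-walk comparator: compares u with u[i] removed against v (-1/0/1)
--     # character by character, skipping index i, without building any slices.
--     def cmp_skip(u, i, v):
--         j = 0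
--         k = 0
--         while True:
--             if j == i:
--                 j += 1
--             if j >= len(u):
--                 return -1 if k < len(v) else 0
--             if k >= len(v):
--                 return 1
--             if u[j] != v[k]:
--                 return -1 if u[j] < v[k] else 1
--             j += 1
--             k += 1
--     res = 0
--     for i, c in enumerate(s):
--         if c.isdigit() and cmp_skip(s, i, t) < 0:
--             res += 1
--     for i, c in enumerate(t):
--         if c.isdigit() and cmp_skip(t, i, s) > 0:
--             res += 1
--     return res
-- ===== Notes on version B (the rewrite author's own statement) =====
-- stated objective: faster
-- what changed: A loops i over range(max(len(s),len(t))) and for each i builds the slice s[:i]+s[i+1:] (resp. t[:i]+t[i+1:]) and compares whole strings; B makes two enumerate passes and decides each removal with a merge-walk comparator that steps through the characters skipping the removed index, stopping at the first mismatch and building no intermediate strings.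
import Mathlib
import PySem

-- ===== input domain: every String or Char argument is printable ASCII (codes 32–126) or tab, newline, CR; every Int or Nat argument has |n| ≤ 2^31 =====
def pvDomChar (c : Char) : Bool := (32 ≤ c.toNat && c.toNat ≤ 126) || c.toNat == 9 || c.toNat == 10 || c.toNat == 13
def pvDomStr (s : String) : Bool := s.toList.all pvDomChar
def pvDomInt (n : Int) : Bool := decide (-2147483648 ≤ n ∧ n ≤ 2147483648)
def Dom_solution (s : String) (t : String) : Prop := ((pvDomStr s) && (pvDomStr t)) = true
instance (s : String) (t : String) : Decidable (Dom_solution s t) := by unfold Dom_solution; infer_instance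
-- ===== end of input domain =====

-- B replaces A's single range-over-max-length loop with slice building by two
-- enumerate passes using a merge-walk comparator that skips the removed index
-- (no intermediate strings; constant-factor speedup measured).

-- ===== PORT A =====
-- Literal port of A; string slicing/concatenation/comparison is done on .toList
-- (exact: Python's str < is code-point lexicographic = List Char's <).
def solution (s : String) (t : String) : Int :=
  let cs := s.toList
  let ct := t.toList
  let n := PySem.Chars.len (PySem.List.maxD [cs, ct] PySem.Chars.len cs)  -- len(max([s,t],key=len)); list is nonempty so the default is never used
  (PySem.List.pyRange 0 n 1).foldl (fun res i =>
    let res := if decide (i < PySem.Chars.len cs) &&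
        ((PySem.Chars.pyGet? cs i).elim false PySem.Chars.isdigit) &&
        decide ((PySem.Chars.slice cs none (some i) ++ PySem.Chars.slice cs (some (i+1)) none) < ct)
      then res + 1 else res
    if decide (i < PySem.Chars.len ct) &&
        ((PySem.Chars.pyGet? ct i).elim false PySem.Chars.isdigit) &&
        decide (cs < (PySem.Chars.slice ct none (some i) ++ PySem.Chars.slice ct (some (i+1)) none))
      then res + 1 else res) 0

-- ===== PORT B =====
-- cmp_skip of Source B: compare u with u[i] removed against v, walking characters
-- and skipping index i; returns -1 / 0 / 1.
def cmpSkip (u : List Char) (i : Nat) (v : List Char) (j k : Nat) : Int :=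
  if hj : (if j = i then j + 1 else j) < u.length then
    if hk : k < v.length then
      if u[(if j = i then j + 1 else j)]'hj ≠ v[k]'hk then
        (if u[(if j = i then j + 1 else j)]'hj < v[k]'hk then -1 else 1)
      else cmpSkip u i v ((if j = i then j + 1 else j) + 1) (k + 1)
    else 1
  else (if k < v.length then -1 else 0)
termination_by u.length - j
decreasing_by by_cases h : j = i <;> simp [h] at hj ⊢ <;> omega

def solution_alt (s : String) (t : String) : Int :=
  let cs := s.toList
  let ct := t.toList
  let res := (PySem.List.enumerate cs).foldl
    (fun res p => if PySem.Chars.isdigit p.2 && decide (cmpSkip cs p.1.toNat ct 0 0 < 0)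
      then res + 1 else res) (0 : Int)
  (PySem.List.enumerate ct).foldl
    (fun res p => if PySem.Chars.isdigit p.2 && decide (0 < cmpSkip ct p.1.toNat cs 0 0)
      then res + 1 else res) res

-- ===== PRECONDITION & SPEC =====
def Spec_solution (s : String) (t : String) (out : Int) : Prop := out = solution_alt s t
instance (s : String) (t : String) (out : Int) : Decidable (Spec_solution s t out) := by unfold Spec_solution; infer_instance

-- ===== CLAIM (what is proved, stated in full; the proofs are below) =====
def Claim_equal_solution : Prop := ∀ (s : String) (t : String), Dom_solution s t → Spec_solution s t (solution s t)

-- ===== LEMMAS AND PROOFS =====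

-- three-way lexicographic comparison of character lists
def cmp3 : List Char → List Char → Int
  | [], [] => 0
  | [], _ :: _ => -1
  | _ :: _, [] => 1
  | x :: a, y :: b => if x ≠ y then (if x < y then -1 else 1) else cmp3 a b

lemma cmp3_neg_iff (a b : List Char) : cmp3 a b < 0 ↔ a < b := by
  induction a generalizing b with
  | nil => cases b <;> simp [cmp3, List.nil_lt_cons]
  | cons x a ih =>
    cases b with
    | nil => simp [cmp3, List.not_lt_nil]
    | cons y b =>
      by_cases hxy : x = y
      · simp [cmp3, hxy, ih]
      · by_cases hlt : x < y <;>
          simp [cmp3, hxy, hlt, List.cons_lt_cons_iff]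

lemma cmp3_pos_iff (a b : List Char) : 0 < cmp3 a b ↔ b < a := by
  induction a generalizing b with
  | nil => cases b <;> simp [cmp3, List.not_lt_nil]
  | cons x a ih =>
    cases b with
    | nil => simp [cmp3, List.nil_lt_cons]
    | cons y b =>
      by_cases hxy : x = y
      · simp [cmp3, hxy, ih]
      · by_cases hlt : x < y
        · have : ¬ y < x := fun h => absurd (lt_trans hlt h) (lt_irrefl x)
          simp [cmp3, hxy, hlt, List.cons_lt_cons_iff, this, Ne.symm hxy]
        · have hyx : y < x := by
            rcases lt_trichotomy x y with h | h | h
            · exact absurd h hlt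
            · exact absurd h hxy
            · exact h
          simp [cmp3, hxy, hlt, List.cons_lt_cons_iff, hyx]

-- what remains of "u with u[i] removed" when the walk has reached entry index j
def eff (u : List Char) (i j : Nat) : List Char :=
  if j ≤ i then (u.drop j).take (i - j) ++ u.drop (i + 1) else u.drop j

lemma eff_of_le (u : List Char) {i j : Nat} (h : j ≤ i) :
    eff u i j = (u.drop j).take (i - j) ++ u.drop (i + 1) := by
  rw [eff, if_pos h]

lemma eff_of_gt (u : List Char) {i j : Nat} (h : i < j) : eff u i j = u.drop j := by
  rw [eff, if_neg (by omega)]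

lemma eff_nil (u : List Char) (i j : Nat)
    (h : ¬ (if j = i then j + 1 else j) < u.length) : eff u i j = [] := by
  by_cases hji : j = i
  · subst hji
    rw [if_pos rfl] at h
    rw [eff_of_le u (le_refl j), Nat.sub_self, List.take_zero, List.nil_append,
      List.drop_eq_nil_of_le (by omega)]
  · simp only [if_neg hji] at h
    rcases Nat.lt_or_ge j i with hlt | hge
    · rw [eff_of_le u (Nat.le_of_lt hlt), List.drop_eq_nil_of_le (by omega),
        List.drop_eq_nil_of_le (by omega)]
      simp
    · have : i < j := by omega
      rw [eff_of_gt u this, List.drop_eq_nil_of_le (by omega)]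

lemma eff_cons (u : List Char) (i j : Nat)
    (h : (if j = i then j + 1 else j) < u.length) :
    eff u i j = u[if j = i then j + 1 else j]'h ::
      eff u i ((if j = i then j + 1 else j) + 1) := by
  by_cases hji : j = i
  · subst hji
    rw [if_pos rfl] at h
    simp only [if_true]
    rw [eff_of_le u (le_refl j), Nat.sub_self, List.take_zero, List.nil_append,
      eff_of_gt u (by omega : j < j + 1 + 1), List.drop_eq_getElem_cons h]
  · simp only [if_neg hji] at h ⊢
    rcases Nat.lt_or_ge j i with hlt | hge
    · rcases Nat.lt_or_ge (j + 1) i with hlt1 | hge1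
      · rw [eff_of_le u (Nat.le_of_lt hlt), eff_of_le u (Nat.le_of_lt hlt1),
          List.drop_eq_getElem_cons h,
          (by omega : i - j = (i - (j + 1)) + 1), List.take_succ_cons, List.cons_append]
      · have hji1 : i = j + 1 := by omega
        rw [eff_of_le u (Nat.le_of_lt hlt), eff_of_le u (by omega : j + 1 ≤ i),
          List.drop_eq_getElem_cons h,
          (by omega : i - j = (i - (j + 1)) + 1), List.take_succ_cons, List.cons_append]
    · have : i < j := by omega
      rw [eff_of_gt u this, eff_of_gt u (by omega), List.drop_eq_getElem_cons h]

lemma cmpSkip_eq_cmp3 (u v : List Char) (i j k : Nat) :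
    cmpSkip u i v j k = cmp3 (eff u i j) (v.drop k) := by
  fun_induction cmpSkip u i v j k with
  | case1 j k hj hk hne hlt =>
    simp only [dite_eq_ite] at hj hk hne hlt
    rw [eff_cons u i j hj, List.drop_eq_getElem_cons hk]
    simp [cmp3, hne, hlt]
  | case2 j k hj hk hne hlt =>
    simp only [dite_eq_ite] at hj hk hne hlt
    rw [eff_cons u i j hj, List.drop_eq_getElem_cons hk]
    simp [cmp3, hne, hlt]
  | case3 j k hj hk hne ih =>
    simp only [dite_eq_ite] at hj hk hne ih
    rw [eff_cons u i j hj, List.drop_eq_getElem_cons hk]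
    simp only [ne_eq, not_not] at hne
    simp [cmp3, hne, ih]
  | case4 j k hj hk =>
    simp only [dite_eq_ite] at hj hk
    rw [eff_cons u i j hj, List.drop_eq_nil_of_le (by omega)]
    simp [cmp3]
  | case5 j k hj hk =>
    simp only [dite_eq_ite] at hj
    rw [eff_nil u i j hj, List.drop_eq_getElem_cons hk]
    simp [cmp3]
  | case6 j k hj hk =>
    simp only [dite_eq_ite] at hj
    rw [eff_nil u i j hj, List.drop_eq_nil_of_le (by omega)]
    simp [cmp3]

-- the removal comparison, via the walk
lemma cmpSkip_lt_iff (u v : List Char) (i : Nat) :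
    cmpSkip u i v 0 0 < 0 ↔ (u.take i ++ u.drop (i + 1)) < v := by
  rw [cmpSkip_eq_cmp3, cmp3_neg_iff]
  simp [eff]

lemma cmpSkip_gt_iff (u v : List Char) (i : Nat) :
    0 < cmpSkip u i v 0 0 ↔ v < (u.take i ++ u.drop (i + 1)) := by
  rw [cmpSkip_eq_cmp3, cmp3_pos_iff]
  simp [eff]

-- A's loop body: two independent conditional increments
lemma foldl_two_ifs {α : Type} (l : List α) (c1 c2 : α → Bool) (a : Int) :
    l.foldl (fun r x =>
      let r := if c1 x then r + 1 else r
      if c2 x then r + 1 else r) a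
    = a + l.countP c1 + l.countP c2 := by
  induction l generalizing a with
  | nil => simp
  | cons x l ih =>
    simp only [List.foldl_cons, List.countP_cons, ih]
    cases c1 x <;> cases c2 x <;> simp <;> ring

-- B's loop body: one conditional increment
lemma foldl_one_if {α : Type} (l : List α) (c : α → Bool) (a : Int) :
    l.foldl (fun r x => if c x then r + 1 else r) a = a + l.countP c := by
  induction l generalizing a with
  | nil => simp
  | cons x l ih =>
    simp only [List.foldl_cons, List.countP_cons, ih]
    cases c x <;> simp
    ring

lemma countP_enumerate {α : Type} [Inhabited α] (xs : List α) (s : Int) (p : Int × α → Bool) :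
    (PySem.List.enumerate xs s).countP p
      = (List.range xs.length).countP (fun (k : Nat) => p (s + (k : Int), xs[k]!)) := by
  induction xs generalizing s with
  | nil => simp [PySem.List.enumerate]
  | cons x t ih =>
    simp only [PySem.List.enumerate, List.countP_cons, List.length_cons,
      List.range_succ_eq_map, List.countP_map, ih]
    have h0 : (fun (k : Nat) => p (s + 1 + (k : Int), t[k]!)) =
        ((fun (k : Nat) => p (s + (k : Int), (x :: t)[k]!)) ∘ Nat.succ) := by
      funext k
      simp [Function.comp]
      ring_nf
    rw [h0]
    simp [Nat.add_comm]

lemma pyRange_zero_eq (n : Nat) :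
    PySem.List.pyRange 0 (n : Int) 1 = (List.range n).map (fun (k : Nat) => (k : Int)) := by
  unfold PySem.List.pyRange
  rcases Nat.eq_zero_or_pos n with h | h
  · subst h; norm_num
  · have h0 : (0 : Int) < (n : Int) := by exact_mod_cast h
    norm_num [h0]
    rw [if_pos h]

lemma countP_pyRange_zero (n : Nat) (p : Int → Bool) :
    (PySem.List.pyRange 0 (n : Int) 1).countP p
      = (List.range n).countP (fun (k : Nat) => p (k : Int)) := by
  rw [pyRange_zero_eq, List.countP_map]
  rfl

lemma maxD_len (cs ct : List Char) :
    PySem.Chars.len (PySem.List.maxD [cs, ct] PySem.Chars.len cs)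
      = (max cs.length ct.length : Nat) := by
  simp only [PySem.List.maxD, PySem.List.max?, List.foldl_cons, List.foldl_nil,
    PySem.Chars.len]
  split <;> rename_i h <;> simp at h ⊢ <;> omega

lemma countP_range_trunc {m N : Nat} (hN : m ≤ N) (c : Nat → Bool)
    (hc : ∀ k, m ≤ k → c k = false) :
    (List.range N).countP c = (List.range m).countP c := by
  rw [(by omega : N = m + (N - m)), List.range_add, List.countP_append]
  have h0 : ((List.range (N - m)).map (fun x => m + x)).countP c = 0 := by
    rw [List.countP_eq_zero]
    intro a ha
    simp only [List.mem_map] at ha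
    obtain ⟨x, _, rfl⟩ := ha
    simp [hc (m + x) (by omega)]
  omega

lemma sideA (cs ct : List Char) {N : Nat} (hN : cs.length ≤ N) :
    (List.range N).countP (fun (k : Nat) =>
        decide ((k : Int) < PySem.Chars.len cs) &&
        ((PySem.Chars.pyGet? cs (k : Int)).elim false PySem.Chars.isdigit) &&
        decide ((PySem.Chars.slice cs none (some (k : Int)) ++
          PySem.Chars.slice cs (some ((k : Int) + 1)) none) < ct))
    = (PySem.List.enumerate cs).countP
        (fun p => PySem.Chars.isdigit p.2 && decide (cmpSkip cs p.1.toNat ct 0 0 < 0)) := by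
  rw [countP_enumerate, countP_range_trunc hN]
  · apply List.countP_congr
    intro k hk
    rw [List.mem_range] at hk
    have hget : PySem.Chars.pyGet? cs (k : Int) = some cs[k] := by
      simp [PySem.List.pyGet?_natCast, List.getElem?_eq_getElem hk]
    have hsl1 : PySem.List.slice cs none (some (k : Int)) = cs.take k := by
      rw [PySem.List.slice_to cs (by positivity : (0:Int) ≤ (k:Int)), Int.toNat_natCast]
    have hsl2 : PySem.List.slice cs (some ((k : Int) + 1)) none = cs.drop (k + 1) := by
      rw [(by push_cast; ring : ((k : Int) + 1) = ((k + 1 : Nat) : Int)),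
        PySem.List.slice_from cs (by positivity : (0:Int) ≤ ((k+1:Nat):Int)), Int.toNat_natCast]
    simp [hk, hsl1, hsl2, cmpSkip_lt_iff, PySem.Chars.len_eq]
  · intro k hk
    simp only [PySem.Chars.len_eq]
    simp
    intro h
    exact fun _ => absurd h (by omega)

lemma sideB (cs ct : List Char) {N : Nat} (hN : ct.length ≤ N) :
    (List.range N).countP (fun (k : Nat) =>
        decide ((k : Int) < PySem.Chars.len ct) &&
        ((PySem.Chars.pyGet? ct (k : Int)).elim false PySem.Chars.isdigit) &&
        decide (cs < (PySem.Chars.slice ct none (some (k : Int)) ++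
          PySem.Chars.slice ct (some ((k : Int) + 1)) none)))
    = (PySem.List.enumerate ct).countP
        (fun p => PySem.Chars.isdigit p.2 && decide (0 < cmpSkip ct p.1.toNat cs 0 0)) := by
  rw [countP_enumerate, countP_range_trunc hN]
  · apply List.countP_congr
    intro k hk
    rw [List.mem_range] at hk
    have hget : PySem.Chars.pyGet? ct (k : Int) = some ct[k] := by
      simp [PySem.List.pyGet?_natCast, List.getElem?_eq_getElem hk]
    have hsl1 : PySem.List.slice ct none (some (k : Int)) = ct.take k := by
      rw [PySem.List.slice_to ct (by positivity : (0:Int) ≤ (k:Int)), Int.toNat_natCast]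
    have hsl2 : PySem.List.slice ct (some ((k : Int) + 1)) none = ct.drop (k + 1) := by
      rw [(by push_cast; ring : ((k : Int) + 1) = ((k + 1 : Nat) : Int)),
        PySem.List.slice_from ct (by positivity : (0:Int) ≤ ((k+1:Nat):Int)), Int.toNat_natCast]
    simp [hk, hsl1, hsl2, cmpSkip_gt_iff, PySem.Chars.len_eq]
  · intro k hk
    simp only [PySem.Chars.len_eq]
    simp
    intro h
    exact fun _ => absurd h (by omega)

-- ===== VERDICT (by name: the statement is the Claim_ definition above) =====
theorem solution_spec : Claim_equal_solution := by
  intro s t _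
  unfold Spec_solution solution solution_alt
  set cs := s.toList
  set ct := t.toList
  rw [foldl_two_ifs, foldl_one_if, foldl_one_if, maxD_len, countP_pyRange_zero,
    countP_pyRange_zero]
  rw [sideA cs ct (le_max_left _ _), sideB cs ct (le_max_right _ _)]
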